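-- pv_equiv track=rewrite | github.com/OperationNorthwoods/Automate-the-Boring-Stuff-with-Python | ch5ChessGameValidator.py | isValidChessBoard
-- ===== SOURCE A (Python) =====
-- def isValidChessBoard(board):
--
--     total_pieces = 0
--     b_howMany = 0
--     w_howMany = 0
--     w_king = 0
--     w_queen = 0
--     w_bishop = 0
--     w_rook = 0
--     w_knight = 0
--     w_pawn = 0
--     b_king = 0
--     b_queen = 0
--     b_bishop = 0
--     b_rook = 0
--     b_knight = 0
--     b_pawn = 0
--     letters = ['a', 'b', 'c', 'd', 'e', 'f', 'g', 'h']
--     numbers = ['1', '2', '3', '4', '5', '6', '7', '8']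
--     # counting pieces
--     for v in board.values():
--         total_pieces += 1
--         if v[0] == 'w':
--             w_howMany += 1
--             if v[2] == 'k':
--                 if v[3] == 'n':
--                     w_knight += 1
--                 else:
--                     w_king += 1
--             elif v[2] == 'q':
--                 w_queen += 1
--             elif v[2] == 'b':
--                 w_bishop += 1
--             elif v[2] == 'r':
--                 w_rook += 1
--             elif v[2] == 'p':
--                 w_pawn += 1
--
--         if v[0] == 'b':
--             b_howMany += 1
--             w_howMany += 1
--             if v[2] == 'k':
--                 if v[3] == 'n':
--                     b_knight += 1
--                 else:
--                     b_king += 1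
--             elif v[2] == 'q':
--                 b_queen += 1
--             elif v[2] == 'b':
--                 b_bishop += 1
--             elif v[2] == 'r':
--                 b_rook += 1
--             elif v[2] == 'p':
--                 b_pawn += 1
--     # checking range of board
--     for k in board.keys():
--         if k[0] not in letters:
--             return False
--         if k[1] not in numbers:
--             return False
--     # checking pieces
--     if total_pieces > 32:
--         return False
--     elif w_king > 1 or b_king > 1 or b_queen > 1 or w_queen > 1:
--         return False
--     elif w_bishop > 2 or b_bishop > 2:
--         return False
--     elif w_knight > 2 or b_knight > 2:
--         return False
--     elif w_rook > 2 or b_rook > 2: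
--         return False
--     elif w_pawn > 8 or b_pawn > 8:
--         return False
--     else: # if nothing else triggers false than its true
--         return True
-- ===== SOURCE B (Python) =====
-- # B: staged validation instead of a single-pass counter accumulation: length
-- # check, then key-range scan, then one independent counting pass per
-- # (color,type) piece class against a limits table.
-- PIECE_LIMITS = (
--     ('w', 'k', 1), ('w', 'q', 1), ('w', 'b', 2), ('w', 'r', 2), ('w', 'n', 2), ('w', 'p', 8),
--     ('b', 'k', 1), ('b', 'q', 1), ('b', 'b', 2), ('b', 'r', 2), ('b', 'n', 2), ('b', 'p', 8),
-- )
--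
-- def _matches(v, color, typ):
--     if v[0] != color:
--         return False
--     if typ == 'k':
--         return v[2] == 'k' and v[3] != 'n'
--     if typ == 'n':
--         return v[2] == 'k' and v[3] == 'n'
--     return v[2] == typ
--
-- def isValidChessBoard(board):
--     if len(board) > 32:
--         return False
--     values = list(board.values())
--     for k in board:
--         if k[0] not in 'abcdefgh':
--             return False
--         if k[1] not in '12345678':
--             return False
--     for color, typ, limit in PIECE_LIMITS:
--         if sum(1 for v in values if _matches(v, color, typ)) > limit:
--             return False
--     return True
-- ===== Notes on version B (the rewrite author's own statement) =====
-- stated objective: simpler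
-- what changed: Replaces A's single counting pass with 14 named mutable counters plus a trailing elif cascade by a staged design: a length check, a key-range scan, and then one independent counting pass per (color,type) piece class checked against a limits table; the check order is reorganized (safe wherever A returns) and the unused howMany counters are gone.
import Mathlib
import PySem

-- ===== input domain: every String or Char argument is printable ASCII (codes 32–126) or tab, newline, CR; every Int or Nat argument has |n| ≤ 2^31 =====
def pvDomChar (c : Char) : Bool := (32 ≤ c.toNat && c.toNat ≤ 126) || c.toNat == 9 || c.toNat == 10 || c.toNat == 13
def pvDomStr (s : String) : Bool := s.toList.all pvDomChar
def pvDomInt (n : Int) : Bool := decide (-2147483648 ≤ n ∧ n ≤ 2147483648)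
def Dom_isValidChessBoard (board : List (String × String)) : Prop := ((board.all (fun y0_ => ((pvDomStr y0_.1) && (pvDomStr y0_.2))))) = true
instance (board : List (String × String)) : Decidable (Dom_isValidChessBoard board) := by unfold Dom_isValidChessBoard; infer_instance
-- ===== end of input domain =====

-- B replaces A's single-pass 14-counter accumulation + elif cascade by staged
-- checks: length, then key ranges, then one counting pass per piece class
-- against a limits table (objective: simpler).

-- total form of Python s[i]; Pre_ keeps every evaluated index in range, so the
-- default ' ' is never the value Python sees on admitted inputs
def pvCharAt (s : String) (i : Int) : Char := PySem.List.pyGetD s.toList i ' '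

def pvLetters : List Char := ['a', 'b', 'c', 'd', 'e', 'f', 'g', 'h']
def pvNumbers : List Char := ['1', '2', '3', '4', '5', '6', '7', '8']

-- ===== PORT A =====
structure PVCnt where
  total : Int
  bHow : Int
  wHow : Int
  wK : Int
  wQ : Int
  wB : Int
  wR : Int
  wN : Int
  wP : Int
  bK : Int
  bQ : Int
  bB : Int
  bR : Int
  bN : Int
  bP : Int
deriving Repr, DecidableEq

def pvInit : PVCnt := ⟨0, 0, 0, 0, 0, 0, 0, 0, 0, 0, 0, 0, 0, 0, 0⟩

def pvStepA (s0 : PVCnt) (v : String) : PVCnt :=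
  let s := { s0 with total := s0.total + 1 }
  let s :=
    if pvCharAt v 0 = 'w' then
      let s := { s with wHow := s.wHow + 1 }
      if pvCharAt v 2 = 'k' then
        if pvCharAt v 3 = 'n' then { s with wN := s.wN + 1 } else { s with wK := s.wK + 1 }
      else if pvCharAt v 2 = 'q' then { s with wQ := s.wQ + 1 }
      else if pvCharAt v 2 = 'b' then { s with wB := s.wB + 1 }
      else if pvCharAt v 2 = 'r' then { s with wR := s.wR + 1 }
      else if pvCharAt v 2 = 'p' then { s with wP := s.wP + 1 }
      else s
    else s
  if pvCharAt v 0 = 'b' then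
    let s := { s with bHow := s.bHow + 1, wHow := s.wHow + 1 }
    if pvCharAt v 2 = 'k' then
      if pvCharAt v 3 = 'n' then { s with bN := s.bN + 1 } else { s with bK := s.bK + 1 }
    else if pvCharAt v 2 = 'q' then { s with bQ := s.bQ + 1 }
    else if pvCharAt v 2 = 'b' then { s with bB := s.bB + 1 }
    else if pvCharAt v 2 = 'r' then { s with bR := s.bR + 1 }
    else if pvCharAt v 2 = 'p' then { s with bP := s.bP + 1 }
    else s
  else s

-- the key loop: early 'return False', falling through to the final checks (cont)
def pvKeyLoopA (cont : Bool) : List String → Bool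
  | [] => cont
  | k :: rest =>
    if pvCharAt k 0 ∉ pvLetters then false
    else if pvCharAt k 1 ∉ pvNumbers then false
    else pvKeyLoopA cont rest

def isValidChessBoard (board : List (String × String)) : Bool :=
  let c := (board.map Prod.snd).foldl pvStepA pvInit
  pvKeyLoopA
    (if c.total > 32 then false
     else if c.wK > 1 || c.bK > 1 || c.bQ > 1 || c.wQ > 1 then false
     else if c.wB > 2 || c.bB > 2 then false
     else if c.wN > 2 || c.bN > 2 then false
     else if c.wR > 2 || c.bR > 2 then false
     else if c.wP > 8 || c.bP > 8 then false
     else true)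
    (board.map Prod.fst)

-- ===== PORT B =====
def pvPieceLimits : List (Char × Char × Int) :=
  [('w', 'k', 1), ('w', 'q', 1), ('w', 'b', 2), ('w', 'r', 2), ('w', 'n', 2), ('w', 'p', 8),
   ('b', 'k', 1), ('b', 'q', 1), ('b', 'b', 2), ('b', 'r', 2), ('b', 'n', 2), ('b', 'p', 8)]

def pvMatches (v : String) (color typ : Char) : Bool :=
  if pvCharAt v 0 ≠ color then false
  else if typ = 'k' then pvCharAt v 2 == 'k' && pvCharAt v 3 != 'n'
  else if typ = 'n' then pvCharAt v 2 == 'k' && pvCharAt v 3 == 'n'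
  else pvCharAt v 2 == typ

-- B's per-class counting loop: for each (color,typ,limit), count matches in values
def pvClassLoop (values : List String) : List (Char × Char × Int) → Bool
  | [] => true
  | (color, typ, limit) :: rest =>
    if (values.countP (fun v => pvMatches v color typ) : Int) > limit then false
    else pvClassLoop values rest

-- B's key loop with its early returns, falling through to the class loop
def pvKeyLoopB (values : List String) : List String → Bool
  | [] => pvClassLoop values pvPieceLimits
  | k :: rest =>
    if pvCharAt k 0 ∉ "abcdefgh".toList then false
    else if pvCharAt k 1 ∉ "12345678".toList then false
    else pvKeyLoopB values rest

def isValidChessBoard_alt (board : List (String × String)) : Bool :=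
  if PySem.List.len board > 32 then false
  else pvKeyLoopB (board.map Prod.snd) (board.map Prod.fst)

-- ===== PRECONDITION & SPEC =====
-- a value never raises: nonempty, and when its colour is 'w'/'b' it is long
-- enough for v[2] (and for v[3] when v[2] = 'k')
def pvValOk (v : String) : Bool :=
  match v.toList with
  | [] => false
  | c0 :: rest =>
    if c0 = 'w' ∨ c0 = 'b' then
      match rest with
      | _ :: c2 :: rest2 => if c2 = 'k' then !rest2.isEmpty else true
      | _ => false
    else true

def pvKeyPass (k : String) : Bool :=
  match k.toList with
  | c0 :: c1 :: _ => decide (c0 ∈ pvLetters) && decide (c1 ∈ pvNumbers)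
  | _ => false

def pvKeyNoRaise (k : String) : Bool :=
  match k.toList with
  | [] => false
  | [c0] => !(decide (c0 ∈ pvLetters))
  | _ => true

-- Pre_: exactly the inputs where Python A returns (no IndexError): every value is
-- long enough wherever A indexes it, and the first key that does not pass both
-- range checks (the only key whose indexing matters after it) does not raise.
-- Keys are additionally required distinct: a Python dict cannot hold duplicate
-- keys, so duplicate-key association lists encode no dict input of A.
def Pre_isValidChessBoard (board : List (String × String)) : Prop :=
  (board.map Prod.snd).all pvValOk = true ∧
  (match (board.map Prod.fst).dropWhile pvKeyPass with
   | [] => true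
   | k :: _ => pvKeyNoRaise k) = true ∧
  (board.map Prod.fst).Nodup

instance (board : List (String × String)) : Decidable (Pre_isValidChessBoard board) := by
  unfold Pre_isValidChessBoard; infer_instance

def pvWitness_isValidChessBoard : (List (String × String)) :=
  [("a1", "w king"), ("e8", "b queen")]

def Spec_isValidChessBoard (board : List (String × String)) (out : Bool) : Prop := out = isValidChessBoard_alt board
instance (board : List (String × String)) (out : Bool) : Decidable (Spec_isValidChessBoard board out) := by unfold Spec_isValidChessBoard; infer_instance

-- ===== CLAIM (what is proved, stated in full; the proofs are below) =====
def Claim_equal_isValidChessBoard : Prop := ∀ (board : List (String × String)), Dom_isValidChessBoard board → Pre_isValidChessBoard board → Spec_isValidChessBoard board (isValidChessBoard board)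

-- ===== LEMMAS AND PROOFS =====

-- Bool-valued piece predicates (what A's counter for colour c, type t counts)
def pvPiece (c t : Char) (v : String) : Bool :=
  (pvCharAt v 0 == c) &&
  (if t == 'k' then (pvCharAt v 2 == 'k') && !(pvCharAt v 3 == 'n')
   else if t == 'n' then (pvCharAt v 2 == 'k') && (pvCharAt v 3 == 'n')
   else pvCharAt v 2 == t)

-- B's matcher is A's piece predicate
theorem pvMatches_eq (v : String) (c t : Char) :
    pvMatches v c t = pvPiece c t v := by
  simp only [pvMatches, pvPiece, bne]
  split_ifs <;> simp_all

-- one step of A's counting loop, field by field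
set_option maxHeartbeats 1000000 in
theorem pvStepA_fields (s : PVCnt) (v : String) :
    pvStepA s v =
      { total := s.total + 1
        bHow := s.bHow + (if pvCharAt v 0 == 'b' then (1 : Int) else 0)
        wHow := s.wHow + (if pvCharAt v 0 == 'w' then (1 : Int) else 0)
                       + (if pvCharAt v 0 == 'b' then (1 : Int) else 0)
        wK := s.wK + (if pvPiece 'w' 'k' v then (1 : Int) else 0)
        wQ := s.wQ + (if pvPiece 'w' 'q' v then (1 : Int) else 0)
        wB := s.wB + (if pvPiece 'w' 'b' v then (1 : Int) else 0)
        wR := s.wR + (if pvPiece 'w' 'r' v then (1 : Int) else 0)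
        wN := s.wN + (if pvPiece 'w' 'n' v then (1 : Int) else 0)
        wP := s.wP + (if pvPiece 'w' 'p' v then (1 : Int) else 0)
        bK := s.bK + (if pvPiece 'b' 'k' v then (1 : Int) else 0)
        bQ := s.bQ + (if pvPiece 'b' 'q' v then (1 : Int) else 0)
        bB := s.bB + (if pvPiece 'b' 'b' v then (1 : Int) else 0)
        bR := s.bR + (if pvPiece 'b' 'r' v then (1 : Int) else 0)
        bN := s.bN + (if pvPiece 'b' 'n' v then (1 : Int) else 0)
        bP := s.bP + (if pvPiece 'b' 'p' v then (1 : Int) else 0) } := by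
  by_cases h0 : pvCharAt v 0 = 'w' <;> by_cases h1 : pvCharAt v 0 = 'b'
  · rw [h0] at h1; exact absurd h1 (by decide)
  · by_cases h2 : pvCharAt v 2 = 'k'
    · by_cases h3 : pvCharAt v 3 = 'n' <;> simp [pvStepA, pvPiece, h0, h1, h2, h3]
    · by_cases h4 : pvCharAt v 2 = 'q'
      · simp [pvStepA, pvPiece, h0, h1, h2, h4]
      · by_cases h5 : pvCharAt v 2 = 'b'
        · simp [pvStepA, pvPiece, h0, h1, h2, h4, h5]
        · by_cases h6 : pvCharAt v 2 = 'r'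
          · simp [pvStepA, pvPiece, h0, h1, h2, h4, h5, h6]
          · by_cases h7 : pvCharAt v 2 = 'p' <;>
              simp [pvStepA, pvPiece, h0, h1, h2, h4, h5, h6, h7]
  · by_cases h2 : pvCharAt v 2 = 'k'
    · by_cases h3 : pvCharAt v 3 = 'n' <;> simp [pvStepA, pvPiece, h0, h1, h2, h3]
    · by_cases h4 : pvCharAt v 2 = 'q'
      · simp [pvStepA, pvPiece, h0, h1, h2, h4]
      · by_cases h5 : pvCharAt v 2 = 'b'
        · simp [pvStepA, pvPiece, h0, h1, h2, h4, h5]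
        · by_cases h6 : pvCharAt v 2 = 'r'
          · simp [pvStepA, pvPiece, h0, h1, h2, h4, h5, h6]
          · by_cases h7 : pvCharAt v 2 = 'p' <;>
              simp [pvStepA, pvPiece, h0, h1, h2, h4, h5, h6, h7]
  · simp [pvStepA, pvPiece, h0, h1]

-- A's fold, characterised field by field
theorem pvFoldA_spec (vs : List String) (s : PVCnt) :
    vs.foldl pvStepA s =
      { total := s.total + vs.length
        bHow := s.bHow + (vs.countP (fun v => pvCharAt v 0 == 'b') : Int)
        wHow := s.wHow + (vs.countP (fun v => pvCharAt v 0 == 'w') : Int)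
                       + (vs.countP (fun v => pvCharAt v 0 == 'b') : Int)
        wK := s.wK + (vs.countP (pvPiece 'w' 'k') : Int)
        wQ := s.wQ + (vs.countP (pvPiece 'w' 'q') : Int)
        wB := s.wB + (vs.countP (pvPiece 'w' 'b') : Int)
        wR := s.wR + (vs.countP (pvPiece 'w' 'r') : Int)
        wN := s.wN + (vs.countP (pvPiece 'w' 'n') : Int)
        wP := s.wP + (vs.countP (pvPiece 'w' 'p') : Int)
        bK := s.bK + (vs.countP (pvPiece 'b' 'k') : Int)
        bQ := s.bQ + (vs.countP (pvPiece 'b' 'q') : Int)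
        bB := s.bB + (vs.countP (pvPiece 'b' 'b') : Int)
        bR := s.bR + (vs.countP (pvPiece 'b' 'r') : Int)
        bN := s.bN + (vs.countP (pvPiece 'b' 'n') : Int)
        bP := s.bP + (vs.countP (pvPiece 'b' 'p') : Int) } := by
  induction vs generalizing s with
  | nil => simp
  | cons v vs ih =>
    rw [List.foldl_cons, ih, pvStepA_fields]
    dsimp only
    simp only [List.countP_cons, List.length_cons, PVCnt.mk.injEq]
    refine ⟨?_, ?_, ?_, ?_, ?_, ?_, ?_, ?_, ?_, ?_, ?_, ?_, ?_, ?_, ?_⟩ <;>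
      push_cast <;> ring

-- both key loops compute 'if some key is out of range then false else <their cont>'
theorem pvKeyLoopA_eq (cont : Bool) (ks : List String) :
    pvKeyLoopA cont ks =
      if ks.any (fun k => !(decide (pvCharAt k 0 ∈ pvLetters)) || !(decide (pvCharAt k 1 ∈ pvNumbers)))
      then false else cont := by
  induction ks with
  | nil => simp [pvKeyLoopA]
  | cons k rest ih =>
    simp only [pvKeyLoopA, List.any_cons, ih]
    by_cases h0 : pvCharAt k 0 ∈ pvLetters <;> by_cases h1 : pvCharAt k 1 ∈ pvNumbers <;>
      simp [h0, h1]

theorem pvKeyLoopB_eq (vs : List String) (ks : List String) :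
    pvKeyLoopB vs ks =
      if ks.any (fun k => !(decide (pvCharAt k 0 ∈ pvLetters)) || !(decide (pvCharAt k 1 ∈ pvNumbers)))
      then false else pvClassLoop vs pvPieceLimits := by
  induction ks with
  | nil => simp [pvKeyLoopB]
  | cons k rest ih =>
    have hl : "abcdefgh".toList = pvLetters := by decide
    have hn : "12345678".toList = pvNumbers := by decide
    simp only [pvKeyLoopB, List.any_cons, ih, hl, hn]
    by_cases h0 : pvCharAt k 0 ∈ pvLetters <;> by_cases h1 : pvCharAt k 1 ∈ pvNumbers <;>
      simp [h0, h1]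

-- one step of B's class loop
theorem pvClassLoop_cons (vs : List String) (c t : Char) (l : Int)
    (rest : List (Char × Char × Int)) :
    pvClassLoop vs ((c, t, l) :: rest) =
      ((decide ((vs.countP (fun v => pvMatches v c t) : Int) ≤ l)) && pvClassLoop vs rest) := by
  simp only [pvClassLoop]
  split_ifs with h <;> simp <;> omega

-- B's class loop is the conjunction of the twelve per-class bounds
set_option maxHeartbeats 1000000 in
theorem pvClassLoop_iff (vs : List String) :
    (pvClassLoop vs pvPieceLimits = true) ↔
    (vs.countP (pvPiece 'w' 'k') ≤ 1 ∧ vs.countP (pvPiece 'b' 'k') ≤ 1 ∧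
     vs.countP (pvPiece 'b' 'q') ≤ 1 ∧ vs.countP (pvPiece 'w' 'q') ≤ 1 ∧
     vs.countP (pvPiece 'w' 'b') ≤ 2 ∧ vs.countP (pvPiece 'b' 'b') ≤ 2 ∧
     vs.countP (pvPiece 'w' 'n') ≤ 2 ∧ vs.countP (pvPiece 'b' 'n') ≤ 2 ∧
     vs.countP (pvPiece 'w' 'r') ≤ 2 ∧ vs.countP (pvPiece 'b' 'r') ≤ 2 ∧
     vs.countP (pvPiece 'w' 'p') ≤ 8 ∧ vs.countP (pvPiece 'b' 'p') ≤ 8) := by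
  have hm : ∀ c t, (fun v => pvMatches v c t) = pvPiece c t := by
    intro c t; funext v; exact pvMatches_eq v c t
  have hnil : pvClassLoop vs [] = true := rfl
  simp only [pvPieceLimits, pvClassLoop_cons, hm, Bool.and_eq_true,
    decide_eq_true_eq, hnil, and_true]
  omega

-- A's final elif chain, as a conjunction of bounds
theorem pvFinal_true_iff (c : PVCnt) :
    (if c.total > 32 then false
     else if c.wK > 1 || c.bK > 1 || c.bQ > 1 || c.wQ > 1 then false
     else if c.wB > 2 || c.bB > 2 then false
     else if c.wN > 2 || c.bN > 2 then false
     else if c.wR > 2 || c.bR > 2 then false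
     else if c.wP > 8 || c.bP > 8 then false
     else true) = true ↔
    (c.total ≤ 32 ∧ c.wK ≤ 1 ∧ c.bK ≤ 1 ∧ c.bQ ≤ 1 ∧ c.wQ ≤ 1 ∧ c.wB ≤ 2 ∧ c.bB ≤ 2 ∧
     c.wN ≤ 2 ∧ c.bN ≤ 2 ∧ c.wR ≤ 2 ∧ c.bR ≤ 2 ∧ c.wP ≤ 8 ∧ c.bP ≤ 8) := by
  split_ifs <;> simp_all <;> omega

-- ===== VERDICT (by name: the statement is the Claim_ definition above) =====
set_option maxHeartbeats 1000000 in
theorem isValidChessBoard_spec : Claim_equal_isValidChessBoard := by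
  unfold Claim_equal_isValidChessBoard
  intro board _ _
  unfold Spec_isValidChessBoard
  simp only [isValidChessBoard, isValidChessBoard_alt, pvKeyLoopA_eq, pvKeyLoopB_eq]
  rw [PySem.List.len_eq board]
  set vs := board.map Prod.snd with hvs
  set bad := (board.map Prod.fst).any
    (fun k => !(decide (pvCharAt k 0 ∈ pvLetters)) || !(decide (pvCharAt k 1 ∈ pvNumbers))) with hbad
  have hlen : vs.length = board.length := by rw [hvs, List.length_map]
  by_cases hb : bad = true
  · simp [hb]
  · simp only [Bool.not_eq_true] at hb
    simp only [hb, Bool.false_eq_true, if_false]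
    rw [pvFoldA_spec]
    apply Bool.coe_iff_coe.mp
    rw [pvFinal_true_iff]
    have hsplit : ∀ (b : Bool) (x : Int),
        ((if x > 32 then false else b) = true) ↔ (¬ x > 32 ∧ b = true) := by
      intro b x
      split_ifs <;> simp_all
    rw [hsplit, pvClassLoop_iff]
    dsimp only
    simp only [pvInit, hlen]
    omega
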